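-- pv_equiv track=rewrite | github.com/sandwu/leetcode_problems | 3.Hash table/medium/36. Valid Sudoku.py | isValidNine
-- ===== SOURCE A (Python) =====
-- def isValidNine(row):
--     map = {}
--     for c in row:
--         if c != '.':
--             if c in map:
--                 return False
--             else:
--                 map[c] = True
--     return True
-- ===== SOURCE B (Python) =====
-- def isValidNine(row):
--     digits = sorted(c for c in row if c != '.')
--     return all(a != b for a, b in zip(digits, digits[1:]))
-- ===== Notes on version B (the rewrite author's own statement) =====
-- stated objective: alternative
-- what changed: Replaces the hash-based seen-dict loop by sorting the non-dot characters and checking that no two adjacent sorted elements are equal (duplicates are adjacent after sorting).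
import Mathlib
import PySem

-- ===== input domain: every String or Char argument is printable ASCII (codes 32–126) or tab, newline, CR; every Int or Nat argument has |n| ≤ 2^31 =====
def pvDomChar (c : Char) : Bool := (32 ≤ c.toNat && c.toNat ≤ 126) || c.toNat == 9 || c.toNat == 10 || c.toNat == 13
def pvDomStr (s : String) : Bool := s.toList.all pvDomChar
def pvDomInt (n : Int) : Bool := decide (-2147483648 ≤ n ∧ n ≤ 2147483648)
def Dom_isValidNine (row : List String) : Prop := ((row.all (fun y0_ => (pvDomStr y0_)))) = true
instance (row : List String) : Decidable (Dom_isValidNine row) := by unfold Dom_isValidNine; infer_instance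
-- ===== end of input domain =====

-- B sorts the non-dot characters and checks adjacent sorted elements differ (alternative algorithm; duplicates are adjacent after sorting).

-- ===== PORT A =====
-- the for-loop with early 'return False', carrying the dict 'map'
def isValidNineGo : List String → PySem.Dict String Bool → Bool
  | [], _ => true
  | c :: rest, map =>
      if c ≠ "." then
        if map.contains c then false
        else isValidNineGo rest (map.insert c true)
      else isValidNineGo rest map

def isValidNine (row : List String) : Bool := isValidNineGo row PySem.Dict.empty

-- ===== PORT B =====
def isValidNine_alt (row : List String) : Bool :=
  let digits := PySem.List.sorted (row.filter (fun c => c ≠ ".")) (fun x => x) false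
  (digits.zip (PySem.List.slice digits (some 1) none)).all (fun p => p.1 ≠ p.2)

-- ===== PRECONDITION & SPEC =====
def Spec_isValidNine (row : List String) (out : Bool) : Prop := out = isValidNine_alt row
instance (row : List String) (out : Bool) : Decidable (Spec_isValidNine row out) := by unfold Spec_isValidNine; infer_instance

-- ===== CLAIM =====
def Claim_equal_isValidNine : Prop := ∀ (row : List String), Dom_isValidNine row → Spec_isValidNine row (isValidNine row)

-- ===== LEMMAS AND PROOFS =====

-- membership test against the dict after inserting c splits into "not c" and the old dict
lemma all_not_contains_insert (F : List String) (m : PySem.Dict String Bool) (c : String) :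
    (F.all (fun d => !((m.insert c true).contains d)))
      = (!F.contains c && F.all (fun d => !(m.contains d))) := by
  rw [Bool.eq_iff_iff]
  simp [PySem.Dict.contains_insert]
  constructor
  · intro h
    exact ⟨fun hc => (h c hc).1 rfl, fun d hd => (h d hd).2⟩
  · intro h d hd
    exact ⟨fun hdc => h.1 (hdc ▸ hd), h.2 d hd⟩

-- A's loop decides: the filtered suffix is duplicate-free and disjoint from the keys seen so far
lemma isValidNineGo_spec (row : List String) (m : PySem.Dict String Bool) :
    isValidNineGo row m
      = ((row.filter (fun c => c ≠ ".")).Nodup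
          && (row.filter (fun c => c ≠ ".")).all (fun c => !(m.contains c))) := by
  induction row generalizing m with
  | nil => simp [isValidNineGo]
  | cons c rest ih =>
      by_cases hc : c = "."
      · simp [isValidNineGo, hc, ih]
      · have hfc : (c :: rest).filter (fun x => x ≠ ".")
            = c :: rest.filter (fun x => x ≠ ".") := by simp [hc]
        by_cases hm : m.contains c
        · have : isValidNineGo (c :: rest) m = false := by simp [isValidNineGo, hc, hm]
          rw [this, hfc]
          simp [hm]
        · have h1 : isValidNineGo (c :: rest) m = isValidNineGo rest (m.insert c true) := by
            simp [isValidNineGo, hc, hm]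
          rw [h1, ih, all_not_contains_insert, hfc]
          simp only [List.nodup_cons, List.all_cons, hm, Bool.not_false, Bool.true_and]
          rw [Bool.eq_iff_iff]
          simp
          tauto

-- on a ≤-sorted list, adjacent elements all differing is exactly duplicate-freeness
lemma zip_adj_ne_iff_nodup (xs : List String) (h : xs.Pairwise (· ≤ ·)) :
    (∀ p ∈ xs.zip (xs.drop 1), p.1 ≠ p.2) ↔ xs.Nodup := by
  induction xs with
  | nil => simp
  | cons a l ih =>
      cases l with
      | nil => simp
      | cons b rest =>
          have hp := List.pairwise_cons.mp h
          have hab : a ≤ b := hp.1 b (by simp)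
          have hl := hp.2
          have hbr := (List.pairwise_cons.mp hl).1
          have ih' := ih hl
          simp only [List.drop_one, List.tail_cons, List.zip_cons_cons, List.forall_mem_cons] at *
          constructor
          · rintro ⟨hne, hrest⟩
            have hnodl : (b :: rest).Nodup := ih'.mp hrest
            refine List.nodup_cons.mpr ⟨?_, hnodl⟩
            intro hmem
            rcases List.mem_cons.mp hmem with h1 | h2
            · exact hne h1
            · have hba : b ≤ a := hbr a h2
              exact hne (le_antisymm hab hba)
          · intro hnod
            have hninl := (List.nodup_cons.mp hnod).1
            refine ⟨fun heq => hninl (heq ▸ List.mem_cons_self), ?_⟩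
            exact ih'.mpr (List.nodup_cons.mp hnod).2

-- ===== VERDICT =====
theorem isValidNine_spec : Claim_equal_isValidNine := by
  intro row _
  unfold Spec_isValidNine isValidNine isValidNine_alt
  rw [isValidNineGo_spec]
  simp only [PySem.Dict.contains_empty, Bool.not_false]
  set F := row.filter (fun c => c ≠ ".") with hF
  set S := PySem.List.sorted F (fun x => x) false with hS
  have hperm : S.Perm F := PySem.List.sorted_perm F (fun x => x) false
  have hpair : S.Pairwise (· ≤ ·) := PySem.List.sorted_pairwise F (fun x => x)
  have hslice : PySem.List.slice S (some 1) none = S.drop 1 := by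
    have := PySem.List.slice_from_natCast S 1
    simpa using this
  rw [hslice]
  rw [Bool.eq_iff_iff]
  simp only [Bool.and_eq_true, List.all_eq_true, decide_eq_true_eq]
  rw [zip_adj_ne_iff_nodup S hpair, hperm.nodup_iff]
  constructor
  · intro h; exact h.1
  · intro h; exact ⟨h, fun _ _ => trivial⟩
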